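-- pv_equiv track=rewrite | github.com/AmmarKhalid123/disease-identifier | main.py | shouldAdd
-- ===== SOURCE A (Python) =====
-- def shouldAdd(record, records_to_not_inclcude):
--     for symp, ins in records_to_not_inclcude.items():
--         if ins == "no":
--             if symp in record:
--                 return False
--         if ins == "yes":
--             if symp not in record:
--                 return False
--     return True
-- ===== SOURCE B (Python) =====
-- def shouldAdd(record, records_to_not_inclcude):
--     include = {s for s, i in records_to_not_inclcude.items() if i == "yes"}
--     exclude = {s for s, i in records_to_not_inclcude.items() if i == "no"}
--     return include.issubset(record) and exclude.isdisjoint(record)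
-- ===== Notes on version B (the rewrite author's own statement) =====
-- stated objective: simpler
-- what changed: Replaces the interleaved per-key loop with early returns by first partitioning the constraint dict into a required and a forbidden symptom set and then applying subset/disjointness checks.
import Mathlib
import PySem

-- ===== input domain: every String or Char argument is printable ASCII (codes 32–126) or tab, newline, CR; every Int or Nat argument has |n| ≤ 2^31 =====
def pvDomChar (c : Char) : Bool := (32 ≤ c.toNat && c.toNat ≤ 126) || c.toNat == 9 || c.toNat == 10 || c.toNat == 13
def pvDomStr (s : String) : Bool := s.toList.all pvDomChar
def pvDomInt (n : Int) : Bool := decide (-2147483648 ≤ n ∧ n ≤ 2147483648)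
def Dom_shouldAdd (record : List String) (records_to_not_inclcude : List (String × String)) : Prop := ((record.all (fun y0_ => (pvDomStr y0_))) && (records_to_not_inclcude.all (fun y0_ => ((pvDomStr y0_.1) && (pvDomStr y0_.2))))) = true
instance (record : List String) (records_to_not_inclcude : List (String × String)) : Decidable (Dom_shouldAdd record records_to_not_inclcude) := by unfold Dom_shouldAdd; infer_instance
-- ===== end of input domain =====

-- B replaces A's interleaved per-key loop with early returns by partitioning the constraints into a required and a forbidden symptom set and checking subset/disjointness (objective: simpler decomposition, same cost).


-- ===== PORT A =====
-- literal transliteration of A: one pass over the items, early return on a violated constraint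
def shouldAdd (record : List String) (records_to_not_inclcude : List (String × String)) : Bool :=
  match records_to_not_inclcude with
  | [] => true
  | (symp, ins) :: rest =>
    if ins == "no" && record.contains symp then false
    else if ins == "yes" && !(record.contains symp) then false
    else shouldAdd record rest

-- ===== PORT B =====
-- B: partition the constraints into required / forbidden symptom sets, then subset & disjoint checks
def shouldAdd_alt (record : List String) (records_to_not_inclcude : List (String × String)) : Bool :=
  let includeS := PySem.Set.ofList ((records_to_not_inclcude.filter (fun p => p.2 == "yes")).map Prod.fst)
  let excludeS := PySem.Set.ofList ((records_to_not_inclcude.filter (fun p => p.2 == "no")).map Prod.fst)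
  PySem.Set.issubset includeS record && PySem.Set.isdisjoint excludeS record

-- ===== PRECONDITION & SPEC =====
def Spec_shouldAdd (record : List String) (records_to_not_inclcude : List (String × String)) (out : Bool) : Prop := out = shouldAdd_alt record records_to_not_inclcude
instance (record : List String) (records_to_not_inclcude : List (String × String)) (out : Bool) : Decidable (Spec_shouldAdd record records_to_not_inclcude out) := by unfold Spec_shouldAdd; infer_instance

-- ===== CLAIM (what is proved, stated in full; the proofs are below) =====
def Claim_equal_shouldAdd : Prop := ∀ (record : List String) (records_to_not_inclcude : List (String × String)), Dom_shouldAdd record records_to_not_inclcude → Spec_shouldAdd record records_to_not_inclcude (shouldAdd record records_to_not_inclcude)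

-- ===== LEMMAS AND PROOFS =====
theorem shouldAdd_a_iff (record : List String) (l : List (String × String)) :
    shouldAdd record l = true ↔
      ∀ p ∈ l, (p.2 = "no" → p.1 ∉ record) ∧ (p.2 = "yes" → p.1 ∈ record) := by
  induction l with
  | nil => simp [shouldAdd]
  | cons hd tl ih =>
    obtain ⟨symp, ins⟩ := hd
    by_cases hno : ins = "no" <;> by_cases hyes : ins = "yes" <;> by_cases hmem : symp ∈ record <;>
      simp [shouldAdd, hno, hyes, hmem, ih, List.contains_iff_mem, List.mem_cons]

theorem shouldAdd_alt_iff (record : List String) (l : List (String × String)) :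
    shouldAdd_alt record l = true ↔
      ∀ p ∈ l, (p.2 = "no" → p.1 ∉ record) ∧ (p.2 = "yes" → p.1 ∈ record) := by
  simp only [shouldAdd_alt, PySem.Set.issubset, PySem.Set.isdisjoint, Bool.and_eq_true,
    Bool.not_eq_true', List.any_eq_false, List.all_eq_true, PySem.Set.mem_ofList,
    List.mem_map, List.mem_filter, PySem.Set.contains, List.contains_iff_mem, Bool.not_eq_true,
    beq_iff_eq, forall_exists_index, and_imp]
  constructor
  · rintro ⟨hsub, hdis⟩ p hp
    refine ⟨fun hno hm => ?_, fun hyes => ?_⟩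
    · exact absurd hm (by simpa using hdis p.1 p hp hno rfl)
    · exact hsub p.1 p hp hyes rfl
  · rintro h
    refine ⟨fun x p hp hyes hx => ?_, fun x p hp hno hx => ?_⟩
    · subst hx; exact (h p hp).2 hyes
    · subst hx; simpa using (h p hp).1 hno

-- ===== VERDICT (by name: the statement is the Claim_ definition above) =====
theorem shouldAdd_spec : Claim_equal_shouldAdd := by
  intro record l _
  unfold Spec_shouldAdd
  exact Bool.eq_iff_iff.mpr ((shouldAdd_a_iff record l).trans (shouldAdd_alt_iff record l).symm)
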